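-- pv_equiv track=rewrite | github.com/hpriya-p/Sudoku-Solver | sudoku.py | number_not_blank_grid
-- ===== SOURCE A (Python) =====
-- def number_not_blank_grid(grid):
-- 	not_blanks = 0
-- 	for row in grid:
-- 		if ('.' not in row):
-- 			not_blanks += len(row)
-- 		else:
-- 			lonotblank = [x for x in row if x != '.']
-- 			not_blanks += len(lonotblank)
-- 	return not_blanks
-- ===== SOURCE B (Python) =====
-- def number_not_blank_grid(grid):
--     return sum(len(row) for row in grid) - sum(row.count('.') for row in grid)
-- ===== Notes on version B (the rewrite author's own statement) =====
-- stated objective: simpler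
-- what changed: Counts by complement: total cells (sum of row lengths) minus blank cells (sum of per-row counts of '.'), two generator sums with no per-row branching, instead of A's loop with a membership-test branch and a filtering comprehension.
import Mathlib
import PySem

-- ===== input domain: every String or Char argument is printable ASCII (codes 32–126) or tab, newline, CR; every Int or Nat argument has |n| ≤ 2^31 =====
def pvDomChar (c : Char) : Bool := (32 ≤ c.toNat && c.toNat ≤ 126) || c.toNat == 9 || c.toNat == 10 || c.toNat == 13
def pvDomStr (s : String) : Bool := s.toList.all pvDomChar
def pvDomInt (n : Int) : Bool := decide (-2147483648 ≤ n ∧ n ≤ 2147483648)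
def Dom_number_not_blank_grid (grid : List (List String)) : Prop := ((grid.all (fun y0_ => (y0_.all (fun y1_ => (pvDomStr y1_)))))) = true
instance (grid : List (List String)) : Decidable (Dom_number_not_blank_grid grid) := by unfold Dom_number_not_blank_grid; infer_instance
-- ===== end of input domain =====

-- ===== PORT A =====
-- B changes the decomposition: total cells minus blank cells via two sums; same cost, simpler.
def number_not_blank_grid (grid : List (List String)) : Int :=
  grid.foldl (fun not_blanks row =>
    if "." ∉ row then
      not_blanks + (row.length : Int)
    else
      not_blanks + ((row.filter (fun x => x ≠ ".")).length : Int)) 0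

-- ===== PORT B =====
def number_not_blank_grid_alt (grid : List (List String)) : Int :=
  (grid.map (fun row => (row.length : Int))).sum
    - (grid.map (fun row => (row.count "." : Int))).sum

-- ===== PRECONDITION & SPEC =====
def Spec_number_not_blank_grid (grid : List (List String)) (out : Int) : Prop := out = number_not_blank_grid_alt grid
instance (grid : List (List String)) (out : Int) : Decidable (Spec_number_not_blank_grid grid out) := by unfold Spec_number_not_blank_grid; infer_instance

-- ===== CLAIM (what is proved, stated in full; the proofs are below) =====
def Claim_equal_number_not_blank_grid : Prop := ∀ (grid : List (List String)), Dom_number_not_blank_grid grid → Spec_number_not_blank_grid grid (number_not_blank_grid grid)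

-- ===== LEMMAS AND PROOFS =====

-- per-row value of A's branch equals length minus count of "."
theorem pv_row_step (row : List String) :
    (if "." ∉ row then (row.length : Int)
     else ((row.filter (fun x => x ≠ ".")).length : Int))
    = (row.length : Int) - (row.count "." : Int) := by
  by_cases h : "." ∈ row
  · simp only [h, not_true_eq_false, if_false]
    have hlen : ∀ (l : List String), (l.filter (fun x => x ≠ ".")).length + l.count "." = l.length := by
      intro l
      induction l with
      | nil => simp
      | cons x t ih =>
        by_cases hx : x = "." <;> simp [List.filter_cons, List.count_cons, hx] at ih ⊢ <;> omega
    have hrow := (hlen row)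
    omega
  · simp only [h, not_false_eq_true, if_true]
    have : row.count "." = 0 := List.count_eq_zero.mpr h
    omega

theorem pv_foldl_eq (grid : List (List String)) (a : Int) :
    grid.foldl (fun not_blanks row =>
      if "." ∉ row then not_blanks + (row.length : Int)
      else not_blanks + ((row.filter (fun x => x ≠ ".")).length : Int)) a
    = a + (grid.map (fun row => (row.length : Int))).sum
        - (grid.map (fun row => (row.count "." : Int))).sum := by
  induction grid generalizing a with
  | nil => simp
  | cons r t ih =>
    simp only [List.foldl_cons, List.map_cons, List.sum_cons]
    rw [ih]
    have := pv_row_step r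
    by_cases h : "." ∈ r
    · simp only [h, not_true_eq_false, if_false] at this ⊢
      omega
    · simp only [h, not_false_eq_true, if_true] at this ⊢
      omega

-- ===== VERDICT (by name: the statement is the Claim_ definition above) =====
theorem number_not_blank_grid_spec : Claim_equal_number_not_blank_grid := by
  intro grid _
  unfold Spec_number_not_blank_grid number_not_blank_grid number_not_blank_grid_alt
  rw [pv_foldl_eq]
  omega
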